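-- pv_equiv track=rewrite | github.com/ClimbsRocks/nlpSentiment | loadAndProcessData.py | extractFeatureCountsDoc
-- ===== SOURCE A (Python) =====
-- def extractFeatureCountsDoc(doc, popularWords):
--     docFeatures = {}
--     for word in doc:
--         if word in popularWords:
--             try:
--                 docFeatures[word] += 1
--             except:
--                 docFeatures[word] = 1
--     return docFeatures
-- ===== SOURCE B (Python) =====
-- def extractFeatureCountsDoc(doc, popularWords):
--     popular = set(popularWords)
--     order = dict.fromkeys(w for w in doc if w in popular)
--     return {w: doc.count(w) for w in order}
-- ===== Notes on version B (the rewrite author's own statement) =====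
-- stated objective: idiomatic
-- what changed: A counts incrementally inside one loop that filters each word against popularWords; B first collects the document's distinct popular words in order (set + dict.fromkeys) and then counts each with doc.count in a comprehension.
import Mathlib
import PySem

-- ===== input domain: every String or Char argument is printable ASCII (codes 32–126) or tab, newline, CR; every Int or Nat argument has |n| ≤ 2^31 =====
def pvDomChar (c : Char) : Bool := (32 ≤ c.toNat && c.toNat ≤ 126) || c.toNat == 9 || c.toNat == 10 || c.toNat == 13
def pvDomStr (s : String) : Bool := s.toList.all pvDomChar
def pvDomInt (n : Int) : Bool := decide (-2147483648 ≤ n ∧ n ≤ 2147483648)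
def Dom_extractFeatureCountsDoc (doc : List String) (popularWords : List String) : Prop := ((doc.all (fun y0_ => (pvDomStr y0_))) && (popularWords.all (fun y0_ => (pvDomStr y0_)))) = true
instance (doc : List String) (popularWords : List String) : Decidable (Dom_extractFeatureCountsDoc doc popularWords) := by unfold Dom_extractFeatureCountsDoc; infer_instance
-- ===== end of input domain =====

-- B replaces A's filter-inside-one-counting-loop by collecting the distinct popular words of the
-- document first and then counting each with doc.count — a plainer two-pass decomposition (idiomatic).

-- ===== PORT A =====
-- one loop over doc: if the word is popular, increment (or initialise) its dict entry
def extractFeatureCountsDoc (doc : List String) (popularWords : List String) : List (String × Int) :=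
  (doc.foldl
    (fun docFeatures word =>
      if popularWords.contains word then docFeatures.modify word 0 (· + 1) else docFeatures)
    PySem.Dict.empty).items

-- ===== PORT B =====
-- popular = set(popularWords); order = dict.fromkeys(w for w in doc if w in popular);
-- return {w: doc.count(w) for w in order}
def extractFeatureCountsDoc_alt (doc : List String) (popularWords : List String) : List (String × Int) :=
  let popular := PySem.Set.ofList popularWords
  let order := PySem.List.dedup (doc.filter (fun w => popular.contains w))
  order.map (fun w => (w, (List.count w doc : Int)))

-- ===== PRECONDITION & SPEC =====
def Spec_extractFeatureCountsDoc (doc : List String) (popularWords : List String) (out : List (String × Int)) : Prop := out = extractFeatureCountsDoc_alt doc popularWords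
instance (doc : List String) (popularWords : List String) (out : List (String × Int)) : Decidable (Spec_extractFeatureCountsDoc doc popularWords out) := by unfold Spec_extractFeatureCountsDoc; infer_instance

-- ===== CLAIM (what is proved, stated in full; the proofs are below) =====
def Claim_equal_extractFeatureCountsDoc : Prop := ∀ (doc : List String) (popularWords : List String), Dom_extractFeatureCountsDoc doc popularWords → Spec_extractFeatureCountsDoc doc popularWords (extractFeatureCountsDoc doc popularWords)

-- ===== LEMMAS AND PROOFS =====

-- membership test through set(popularWords) agrees with the list membership A uses
theorem pv_contains_ofList (xs : List String) (x : String) :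
    (PySem.Set.ofList xs).contains x = xs.contains x := by
  simp [pysem]

theorem pv_equal (doc popularWords : List String) :
    extractFeatureCountsDoc doc popularWords = extractFeatureCountsDoc_alt doc popularWords := by
  unfold extractFeatureCountsDoc extractFeatureCountsDoc_alt
  rw [PySem.List.foldl_if_eq_foldl_filter, ← PySem.Dict.counter_eq_foldl,
    PySem.Dict.items_counter]
  simp only [PySem.List.dedup_eq_ofList, pv_contains_ofList]
  apply List.map_congr_left
  intro w hw
  rw [PySem.Set.mem_ofList] at hw
  have hp : popularWords.contains w = true := (List.mem_filter.mp hw).2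
  rw [List.count_filter hp]

-- ===== VERDICT (by name: the statement is the Claim_ definition above) =====
theorem extractFeatureCountsDoc_spec : Claim_equal_extractFeatureCountsDoc := by
  intro doc popularWords _
  unfold Spec_extractFeatureCountsDoc
  exact pv_equal doc popularWords
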